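-- pv_equiv track=rewrite | github.com/RescueDiver/arcs4 | reasoning/pattern_rule_engine.py | find_separator_cols
-- ===== SOURCE A (Python) =====
-- def find_separator_cols(grid):
--     """
--     Columns where every cell is the same color.
--     """
--     h = len(grid)
--     w = len(grid[0])
--
--     cols = []
--     for c in range(w):
--         col = [grid[r][c] for r in range(h)]
--         if len(set(col)) == 1:
--             cols.append(c)
--     return cols
-- ===== SOURCE B (Python) =====
-- def find_separator_cols(grid):
--     """
--     Columns where every cell is the same color.
--     Row-major single pass maintaining a shrinking candidate set.
--     """
--     first = grid[0]
--     candidates = set(range(len(first)))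
--     for r in range(1, len(grid)):
--         row = grid[r]
--         for c in list(candidates):
--             if row[c] != first[c]:
--                 candidates.discard(c)
--     return sorted(candidates)
-- ===== Notes on version B (the rewrite author's own statement) =====
-- stated objective: alternative
-- what changed: Instead of building each column independently and testing len(set(col))==1 (column-major, one list+set per column), B scans the grid once row-major, keeping a shrinking set of candidate columns compared against the first row, and returns the sorted survivors.
import Mathlib
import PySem

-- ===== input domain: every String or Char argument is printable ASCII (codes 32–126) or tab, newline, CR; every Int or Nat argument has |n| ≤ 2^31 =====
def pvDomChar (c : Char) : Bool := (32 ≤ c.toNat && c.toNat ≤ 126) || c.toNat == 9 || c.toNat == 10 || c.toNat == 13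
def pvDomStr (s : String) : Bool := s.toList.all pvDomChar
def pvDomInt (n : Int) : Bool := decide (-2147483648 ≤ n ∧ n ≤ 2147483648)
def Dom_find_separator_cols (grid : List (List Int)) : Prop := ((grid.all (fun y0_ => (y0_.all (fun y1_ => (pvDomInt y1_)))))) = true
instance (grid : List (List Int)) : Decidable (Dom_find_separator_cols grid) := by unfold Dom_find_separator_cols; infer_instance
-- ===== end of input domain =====

-- B replaces A's independent per-column list+set test by a single row-major pass that
-- shrinks a candidate-column set against the first row (objective: alternative decomposition).

-- ===== PORT A =====
def find_separator_cols (grid : List (List Int)) : List Int :=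
  let h := grid.length
  let w := ((PySem.List.pyGet? grid 0).getD []).length
  (PySem.List.pyRange 0 (w : Int) 1).foldl (fun cols c =>
    let col := (PySem.List.pyRange 0 (h : Int) 1).map
      (fun r => PySem.List.pyGetD (PySem.List.pyGetD grid r []) c 0)
    if (PySem.Set.ofList col).length = 1 then cols ++ [c] else cols) []

-- ===== PORT B =====
-- 'for c in list(candidates): if …: candidates.discard(c)' is ported as a filter of the
-- candidate set (same surviving elements; the final result is sorted, so iteration order is immaterial).
def find_separator_cols_alt (grid : List (List Int)) : List Int :=
  let first := ((PySem.List.pyGet? grid 0).getD [])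
  let cands : PySem.Set Int := PySem.Set.ofList (PySem.List.pyRange 0 (first.length : Int) 1)
  let final := (PySem.List.pyRange 1 (grid.length : Int) 1).foldl
    (fun cands r =>
      let row := PySem.List.pyGetD grid r []
      cands.filter (fun c => decide (PySem.List.pyGetD row c 0 = PySem.List.pyGetD first c 0)))
    cands
  PySem.List.sorted final (fun x => x) false

-- ===== PRECONDITION & SPEC =====
-- Pre_ excludes exactly the inputs where A raises IndexError: the empty grid (grid[0]),
-- and ragged grids containing a row shorter than the first row (grid[r][c]).
def Pre_find_separator_cols (grid : List (List Int)) : Prop :=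
  grid ≠ [] ∧ ∀ row ∈ grid, (grid.headD []).length ≤ row.length
instance (grid : List (List Int)) : Decidable (Pre_find_separator_cols grid) := by
  unfold Pre_find_separator_cols; infer_instance

def pvWitness_find_separator_cols : List (List Int) := [[1, 2, 1], [1, 3, 1], [1, 2, 2]]

def Spec_find_separator_cols (grid : List (List Int)) (out : List Int) : Prop := out = find_separator_cols_alt grid
instance (grid : List (List Int)) (out : List Int) : Decidable (Spec_find_separator_cols grid out) := by unfold Spec_find_separator_cols; infer_instance

-- ===== CLAIM (what is proved, stated in full; the proofs are below) =====
def Claim_equal_find_separator_cols : Prop := ∀ (grid : List (List Int)), Dom_find_separator_cols grid → Pre_find_separator_cols grid → Spec_find_separator_cols grid (find_separator_cols grid)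

-- ===== LEMMAS AND PROOFS =====

-- the column comprehension over row indices equals a map over the rows themselves
theorem pv_col_eq (grid : List (List Int)) (f : List Int → Int) :
    (PySem.List.pyRange 0 (grid.length : Int) 1).map
      (fun r => f (PySem.List.pyGetD grid r [])) = grid.map f := by
  have h := PySem.List.map_pyGetD_pyRange_zero' (xs := grid) (d := ([] : List Int))
  conv_rhs => rw [← h]
  rw [List.map_map]
  rfl

-- folding a per-row filter over the rows = one filter by "all rows pass"
theorem pv_foldl_filter (rows : List (List Int)) (p : List Int → Int → Bool) (cs : List Int) :
    rows.foldl (fun cs row => cs.filter (p row)) cs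
      = cs.filter (fun c => rows.all (fun row => p row c)) := by
  induction rows generalizing cs with
  | nil => simp
  | cons row rows ih =>
      simp only [List.foldl_cons, ih, List.filter_filter, List.all_cons]
      exact List.filter_congr (fun c _ => by rw [Bool.and_comm])

-- len(set(a :: l)) == 1  ↔  every element of l equals a
theorem pv_set_len_one (a : Int) (l : List Int) :
    (PySem.Set.ofList (a :: l)).length = 1 ↔ ∀ x ∈ l, x = a := by
  rw [PySem.Set.ofList_cons]
  simp only [List.length_cons]
  constructor
  · intro h x hx
    have h0 : ((PySem.Set.ofList l).discard a).length = 0 := by omega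
    have hnil := List.length_eq_zero_iff.mp h0
    by_contra hne
    have hmem : x ∈ (PySem.Set.ofList l).discard a := by
      rw [PySem.Set.mem_discard, PySem.Set.mem_ofList]; exact ⟨hx, hne⟩
    rw [hnil] at hmem
    simp at hmem
  · intro h
    have hnil : (PySem.Set.ofList l).discard a = [] := by
      rw [List.eq_nil_iff_forall_not_mem]
      intro x hx
      rw [PySem.Set.mem_discard, PySem.Set.mem_ofList] at hx
      exact hx.2 (h x hx.1)
    rw [hnil]
    rfl

-- ===== VERDICT (by name: the statement is the Claim_ definition above) =====
theorem find_separator_cols_spec : Claim_equal_find_separator_cols := by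
  intro grid _ hpre
  obtain ⟨hne, -⟩ := hpre
  cases grid with
  | nil => exact absurd rfl hne
  | cons first rest =>
    unfold Spec_find_separator_cols find_separator_cols find_separator_cols_alt
    simp only [PySem.List.pyGet?_zero_cons, Option.getD_some]
    -- A side: foldl-append-if is a filter of the column range
    rw [PySem.List.foldl_append_ite_eq_filter]
    -- B side: candid>es = the range itself; the row loop is a fold over rest
    rw [PySem.Set.ofList_eq_self_of_nodup (PySem.List.pyRange 0 (first.length : Int) 1) (PySem.List.nodup_pyRange_one 0 (first.length : Int))]
    have hfold := PySem.List.foldl_pyRange_pyGetD' (xs := (first :: rest)) (d := ([] : List Int))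
      (f := fun (cands : List Int) (row : List Int) =>
        cands.filter (fun c => decide (PySem.List.pyGetD row c 0 = PySem.List.pyGetD first c 0)))
      (init := PySem.List.pyRange 0 (first.length : Int) 1) (a := 1) (by norm_num)
    simp only [] at hfold ⊢
    rw [hfold]
    simp only [Int.toNat_one, List.drop_succ_cons, List.drop_zero]
    rw [pv_foldl_filter]
    -- the two filters have the same predicate
    have hpred : ∀ c : Int,
        (decide ((PySem.Set.ofList ((PySem.List.pyRange 0 (((first :: rest).length : Nat) : Int) 1).map
            (fun r => PySem.List.pyGetD (PySem.List.pyGetD (first :: rest) r []) c 0))).length = 1))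
        = rest.all (fun row => decide (PySem.List.pyGetD row c 0 = PySem.List.pyGetD first c 0)) := by
      intro c
      rw [pv_col_eq (first :: rest) (fun row => PySem.List.pyGetD row c 0)]
      simp only [List.map_cons]
      rw [Bool.eq_iff_iff, decide_eq_true_eq, pv_set_len_one, List.all_eq_true]
      constructor
      · intro h row hrow
        simp only [decide_eq_true_eq]
        exact h _ (List.mem_map_of_mem hrow)
      · intro h x hx
        obtain ⟨row, hrow, rfl⟩ := List.mem_map.mp hx
        simpa using h row hrow
    -- result of the B-filter is already sorted ascending
    have hsorted : ((PySem.List.pyRange 0 (first.length : Int) 1).filter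
        (fun c => rest.all (fun row => decide (PySem.List.pyGetD row c 0 = PySem.List.pyGetD first c 0)))).Pairwise
        (fun a b => (fun x : Int => x) a ≤ (fun x : Int => x) b) :=
      ((PySem.List.pairwise_lt_pyRange_one 0 (first.length : Int)).filter _).imp (fun h => le_of_lt h)
    rw [PySem.List.sorted_eq_self_of_pairwise _ _ hsorted]
    exact List.filter_congr (fun c _ => hpred c)
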